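-- pv_equiv track=rewrite | github.com/MatayMayrany/advent-of-code | 2022/day-6-2022/day6.py | get_count_till_all_unique
-- ===== SOURCE A (Python) =====
-- def get_count_till_all_unique(item, unique_count):
--     result = 0
--     uniques = []
--     for char in item:
--         index = len(uniques)
--         for unique in reversed(uniques):
--             if unique == char:
--                 del uniques[0:index]
--             else:
--                 index -= 1
--         uniques.append(char)
--         result += 1
--         if len(uniques) == unique_count:
--             break
--     return result
-- ===== SOURCE B (Python) =====
-- def get_count_till_all_unique(item, unique_count):
--     last = {}
--     start = 0
--     for i, ch in enumerate(item):
--         j = last.get(ch)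
--         if j is not None and j >= start:
--             start = j + 1
--         last[ch] = i
--         if i - start + 1 == unique_count:
--             return i + 1
--     return len(item)
-- ===== Notes on version B (the rewrite author's own statement) =====
-- stated objective: faster
-- what changed: Replaces the dedup-list with an inner reversed scan and prefix deletions by a one-pass sliding window keeping only a last-seen-index dict and a window start index.
import Mathlib
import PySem

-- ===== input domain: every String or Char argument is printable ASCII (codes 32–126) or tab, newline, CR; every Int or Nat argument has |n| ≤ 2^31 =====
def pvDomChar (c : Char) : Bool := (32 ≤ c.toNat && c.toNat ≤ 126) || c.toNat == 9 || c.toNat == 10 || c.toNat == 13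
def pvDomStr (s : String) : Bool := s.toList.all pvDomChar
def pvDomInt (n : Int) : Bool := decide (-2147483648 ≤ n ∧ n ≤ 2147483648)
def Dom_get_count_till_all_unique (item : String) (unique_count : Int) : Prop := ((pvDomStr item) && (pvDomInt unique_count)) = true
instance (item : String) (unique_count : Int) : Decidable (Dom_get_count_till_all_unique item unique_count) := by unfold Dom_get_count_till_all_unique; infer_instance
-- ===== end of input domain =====

-- B replaces A's dedup-list with inner reversed scan + prefix deletion by a one-pass
-- sliding window (last-seen-index dict + start index); asymptotic speed-up O(n*k) → O(n).

-- ===== PORT A =====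
-- Python's `for unique in reversed(uniques): if unique == char: del uniques[0:index] else: index -= 1`.
-- `j` is the reversed iterator's cursor + 1 (it next reads element j-1); CPython's
-- list_reverseiterator stops when its cursor is < 0 or ≥ the (possibly shrunk) list's length.
def pvInnerA (c : Char) : List Char → Nat → Nat → List Char
  | u, 0, _ => u
  | u, j+1, index =>
    if _h : j < u.length then
      if u[j] = c then pvInnerA c (u.drop index) j index
      else pvInnerA c u j (index - 1)
    else u

def pvLoopA (ucount : Int) : List Char → Int → List Char → Int
  | [], result, _ => result
  | ch :: rest, result, uniques =>
    let index := uniques.length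
    let u := pvInnerA ch uniques uniques.length index
    let u2 := u ++ [ch]
    let result2 := result + 1
    if (u2.length : Int) = ucount then result2 else pvLoopA ucount rest result2 u2

def get_count_till_all_unique (item : String) (unique_count : Int) : Int :=
  pvLoopA unique_count item.toList 0 []

-- ===== PORT B =====
def pvLoopB (ucount : Int) (n : Int) : List Char → Int → Int → PySem.Dict Char Int → Int
  | [], _, _, _ => n
  | ch :: rest, i, start, last =>
    let start' := match PySem.Dict.get? last ch with
      | some j => if start ≤ j then j + 1 else start
      | none => start
    let last' := PySem.Dict.insert last ch i
    if i - start' + 1 = ucount then i + 1 else pvLoopB ucount n rest (i + 1) start' last'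

def get_count_till_all_unique_alt (item : String) (unique_count : Int) : Int :=
  pvLoopB unique_count (item.toList.length : Int) item.toList 0 0 PySem.Dict.empty

-- ===== PRECONDITION & SPEC =====
def Spec_get_count_till_all_unique (item : String) (unique_count : Int) (out : Int) : Prop := out = get_count_till_all_unique_alt item unique_count
instance (item : String) (unique_count : Int) (out : Int) : Decidable (Spec_get_count_till_all_unique item unique_count out) := by unfold Spec_get_count_till_all_unique; infer_instance

-- ===== CLAIM (what is proved, stated in full; the proofs are below) =====
def Claim_equal_get_count_till_all_unique : Prop := ∀ (item : String) (unique_count : Int), Dom_get_count_till_all_unique item unique_count → Spec_get_count_till_all_unique item unique_count (get_count_till_all_unique item unique_count)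

-- ===== LEMMAS AND PROOFS =====

-- if c is not in the list, the reversed scan only decrements the local index
theorem pvInnerA_not_mem (c : Char) (u : List Char) (hc : c ∉ u) :
    ∀ j index, pvInnerA c u j index = u := by
  intro j
  induction j with
  | zero => intro index; rfl
  | succ j ih =>
    intro index
    unfold pvInnerA
    split
    · rename_i h
      have : u[j] ≠ c := fun he => hc (he ▸ u.getElem_mem h)
      simp [this, ih]
    · rfl

-- characterisation of the inner loop on a Nodup window scanned from position j-1 down,
-- with index = j and c absent from the already-scanned suffix u.drop j
theorem pvInnerA_go (c : Char) :
    ∀ (j : Nat) (u : List Char), u.Nodup → j ≤ u.length → c ∉ u.drop j →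
    pvInnerA c u j j = if c ∈ u then u.drop (u.idxOf c + 1) else u := by
  intro j
  induction j with
  | zero =>
    intro u _ _ hnot
    simp at hnot
    simp [pvInnerA, hnot]
  | succ j ih =>
    intro u hnd hle hnot
    have hj : j < u.length := by omega
    unfold pvInnerA
    simp only [hj, dif_pos]
    by_cases hc : u[j] = c
    · -- match: delete first j+1 elements, then the rest of the scan is a no-op
      have hdrop : c ∉ u.drop (j+1) := hnot
      have hm : c ∈ u := hc ▸ u.getElem_mem hj
      have hidx : u.idxOf c = j := by
        have h1 : u.idxOf c < u.length := List.idxOf_lt_length_of_mem hm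
        have h2 : u[u.idxOf c] = c := List.getElem_idxOf h1
        have := (List.Nodup.getElem_inj_iff hnd (hi := h1) (hj := hj)).mp (by rw [h2, hc])
        omega
      rw [if_pos hc, pvInnerA_not_mem c (u.drop (j+1)) hdrop, if_pos hm, hidx]
    · rw [if_neg hc]
      have hnot' : c ∉ u.drop j := by
        rw [← List.getElem_cons_drop hj]
        intro hmem
        rcases List.mem_cons.mp hmem with h | h
        · exact hc h.symm
        · exact hnot h
      have : j + 1 - 1 = j := rfl
      rw [this, ih u hnd (le_of_lt hj) hnot']

-- the invariant tying A's window list to B's (start, last-seen dict) state at step i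
def pvInv (i start : Int) (uniques : List Char) (last : PySem.Dict Char Int) : Prop :=
  (uniques.length : Int) = i - start ∧ uniques.Nodup ∧
  (∀ c : Char,
    (∀ j : Int, PySem.Dict.get? last c = some j →
        (start ≤ j ↔ c ∈ uniques) ∧ (start ≤ j → j = start + (uniques.idxOf c : Int))) ∧
    (PySem.Dict.get? last c = none → c ∉ uniques))

theorem mem_drop_iff_idxOf {u : List Char} (hnd : u.Nodup) {c : Char} (hm : c ∈ u) (k : Nat) :
    c ∈ u.drop k ↔ k ≤ u.idxOf c := by
  have h1 : u.idxOf c < u.length := List.idxOf_lt_length_of_mem hm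
  have h2 : u[u.idxOf c] = c := List.getElem_idxOf h1
  constructor
  · intro hmem
    obtain ⟨m, hm2, he⟩ := List.getElem_of_mem hmem
    rw [List.getElem_drop] at he
    have hlt : k + m < u.length := by
      have := u.length_drop (i := k); omega
    have : k + m = u.idxOf c :=
      (List.Nodup.getElem_inj_iff hnd (hi := hlt) (hj := h1)).mp (by rw [he, h2])
    omega
  · intro hk
    have hlt : u.idxOf c - k < u.length - k := by omega
    have : (u.drop k)[u.idxOf c - k]'(by simpa using hlt) = c := by
      rw [List.getElem_drop]
      have : k + (u.idxOf c - k) = u.idxOf c := by omega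
      simp [this, h2]
    exact this ▸ List.getElem_mem _

theorem idxOf_drop {u : List Char} (hnd : u.Nodup) {c : Char} {k : Nat}
    (hmem : c ∈ u.drop k) : (u.drop k).idxOf c = u.idxOf c - k := by
  have hm : c ∈ u := List.mem_of_mem_drop hmem
  have h1 : u.idxOf c < u.length := List.idxOf_lt_length_of_mem hm
  have h2 : u[u.idxOf c] = c := List.getElem_idxOf h1
  have hk : k ≤ u.idxOf c := (mem_drop_iff_idxOf hnd hm k).mp hmem
  have hdnd : (u.drop k).Nodup := hnd.sublist (List.drop_sublist k u)
  have hlen : u.idxOf c - k < (u.drop k).length := by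
    rw [List.length_drop]; omega
  have hget : (u.drop k)[u.idxOf c - k] = c := by
    rw [List.getElem_drop]
    have : k + (u.idxOf c - k) = u.idxOf c := by omega
    simp [this, h2]
  have h1' : (u.drop k).idxOf c < (u.drop k).length :=
    List.idxOf_lt_length_of_mem hmem
  have h2' : (u.drop k)[(u.drop k).idxOf c] = c := List.getElem_idxOf h1'
  exact (List.Nodup.getElem_inj_iff hdnd (hi := h1') (hj := hlen)).mp (by rw [h2', hget])

theorem not_mem_drop_idxOf_succ {u : List Char} (hnd : u.Nodup) {c : Char} (hm : c ∈ u) :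
    c ∉ u.drop (u.idxOf c + 1) := by
  intro hmem
  have := (mem_drop_iff_idxOf hnd hm (u.idxOf c + 1)).mp hmem
  omega

-- main simulation lemma: A's loop equals B's loop from any pair of states related by pvInv
theorem pvLoop_eq (ucount : Int) :
    ∀ (rest : List Char) (i start : Int) (uniques : List Char) (last : PySem.Dict Char Int)
      (n : Int), pvInv i start uniques last → n = i + (rest.length : Int) →
      pvLoopA ucount rest i uniques = pvLoopB ucount n rest i start last := by
  intro rest
  induction rest with
  | nil =>
    intro i start uniques last n _ hn
    simp only [pvLoopA, pvLoopB]; simp at hn; omega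
  | cons ch rest ih =>
    intro i start uniques last n hinv hn
    obtain ⟨hlen, hnd, hdict⟩ := hinv
    have hstart : start ≤ i := by omega
    -- evaluate A's inner loop
    have hinner : pvInnerA ch uniques uniques.length uniques.length =
        if ch ∈ uniques then uniques.drop (uniques.idxOf ch + 1) else uniques :=
      pvInnerA_go ch uniques.length uniques hnd le_rfl (by simp)
    -- B's new start
    set start' : Int := (match PySem.Dict.get? last ch with
      | some j => if start ≤ j then j + 1 else start
      | none => start) with hstart'def
    -- A's new window
    set w : List Char := if ch ∈ uniques then uniques.drop (uniques.idxOf ch + 1) else uniques with hwdef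
    clear_value start' w
    have hchw : ch ∉ w := by
      by_cases hm : ch ∈ uniques
      · rw [hwdef, if_pos hm]
        exact not_mem_drop_idxOf_succ hnd hm
      · rw [hwdef, if_neg hm]; exact hm
    -- the key numeric fact: (w ++ [ch]).length = (i+1) - start'
    have hkey : ((w ++ [ch]).length : Int) = (i + 1) - start' := by
      rw [List.length_append, List.length_singleton]
      cases hg : PySem.Dict.get? last ch with
      | none =>
        have hnm : ch ∉ uniques := (hdict ch).2 hg
        rw [hstart'def]
        simp only [hg]
        rw [hwdef, if_neg hnm]; omega
      | some j =>
        by_cases hle : start ≤ j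
        · have hm : ch ∈ uniques := ((hdict ch).1 j hg).1.mp hle
          have hjeq : j = start + (uniques.idxOf ch : Int) := ((hdict ch).1 j hg).2 hle
          have hidxlt : uniques.idxOf ch < uniques.length := List.idxOf_lt_length_of_mem hm
          rw [hstart'def]; simp only [hg, if_pos hle]
          rw [hwdef, if_pos hm, List.length_drop]
          have h1 : uniques.length - (List.idxOf ch uniques + 1) + 1
              = uniques.length - List.idxOf ch uniques := by omega
          rw [h1, Nat.cast_sub (by omega)]
          omega
        · have hnm : ch ∉ uniques := fun h => hle (((hdict ch).1 j hg).1.mpr h)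
          rw [hstart'def]; simp only [hg, if_neg hle]
          rw [hwdef, if_neg hnm]; omega
    have hwpos : 0 < ((w ++ [ch]).length : Int) := by
      rw [List.length_append, List.length_singleton]; push_cast; omega
    -- invariant for the next step
    have hinv' : pvInv (i+1) start' (w ++ [ch]) (PySem.Dict.insert last ch i) := by
      refine ⟨hkey.trans (by ring), ?_, ?_⟩
      · have hwnd : w.Nodup := by
          rw [hwdef]
          by_cases hm : ch ∈ uniques
          · rw [if_pos hm]; exact hnd.sublist (List.drop_sublist _ _)
          · simpa [hm] using hnd
        rw [List.nodup_append]
        exact ⟨hwnd, List.nodup_singleton ch, by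
          intro a ha b hb; simp at hb; subst hb; exact fun h => hchw (h ▸ ha)⟩
      · intro c
        by_cases hc : c = ch
        · subst hc   -- NOTE: this eliminates ch; the window char is now called c
          constructor
          · intro j hg
            rw [PySem.Dict.get?_insert_self] at hg
            injection hg with hji; subst hji
            constructor
            · constructor
              · intro _; simp
              · intro _; omega
            · intro _
              have hidx : (w ++ [c]).idxOf c = w.length := by
                rw [List.idxOf_append_of_notMem hchw]; simp
              rw [hidx]
              have hk2 := hkey
              rw [List.length_append, List.length_singleton] at hk2
              push_cast at hk2 ⊢
              omega
          · intro hg; rw [PySem.Dict.get?_insert_self] at hg; exact absurd hg (by simp)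
        · have hgins : PySem.Dict.get? (PySem.Dict.insert last ch i) c = PySem.Dict.get? last c :=
            PySem.Dict.get?_insert_of_ne last i hc
          have hmemw : ∀ hm : c ∈ w, (w ++ [ch]).idxOf c = w.idxOf c := fun hm =>
            List.idxOf_append_of_mem hm
          have hmem_iff : c ∈ w ++ [ch] ↔ c ∈ w := by simp [hc]
          constructor
          · intro j hg
            rw [hgins] at hg
            have hold := (hdict c).1 j hg
            cases hgch : PySem.Dict.get? last ch with
            | none =>
              have hstarteq : start' = start := by rw [hstart'def]; simp [hgch]
              have hweq : w = uniques := by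
                rw [hwdef, if_neg ((hdict ch).2 hgch)]
              constructor
              · rw [hstarteq, hmem_iff, hweq]; exact hold.1
              · intro hle
                rw [hstarteq] at hle ⊢
                have := hold.2 hle
                rw [hmemw (hweq ▸ (hold.1.mp hle)), hweq]
                exact this
            | some jch =>
              by_cases hlech : start ≤ jch
              · -- the window was cut just after the previous occurrence of ch
                have hmch : ch ∈ uniques := ((hdict ch).1 jch hgch).1.mp hlech
                have hjch : jch = start + (uniques.idxOf ch : Int) := ((hdict ch).1 jch hgch).2 hlech
                have hstarteq : start' = jch + 1 := by rw [hstart'def]; simp [hgch, hlech]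
                have hweq : w = uniques.drop (uniques.idxOf ch + 1) := by
                  rw [hwdef, if_pos hmch]
                constructor
                · rw [hstarteq, hmem_iff, hweq]
                  constructor
                  · intro hle
                    have hlej : start ≤ j := by omega
                    have hmc : c ∈ uniques := hold.1.mp hlej
                    have hjc : j = start + (uniques.idxOf c : Int) := hold.2 hlej
                    rw [mem_drop_iff_idxOf hnd hmc]
                    omega
                  · intro hmemdrop
                    have hmc : c ∈ uniques := List.mem_of_mem_drop hmemdrop
                    have hlej : start ≤ j := hold.1.mpr hmc
                    have hjc : j = start + (uniques.idxOf c : Int) := hold.2 hlej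
                    have := (mem_drop_iff_idxOf hnd hmc (uniques.idxOf ch + 1)).mp hmemdrop
                    omega
                · intro hle
                  rw [hstarteq] at hle
                  have hlej : start ≤ j := by omega
                  have hmc : c ∈ uniques := hold.1.mp hlej
                  have hjc : j = start + (uniques.idxOf c : Int) := hold.2 hlej
                  have hmemdrop : c ∈ uniques.drop (uniques.idxOf ch + 1) := by
                    rw [mem_drop_iff_idxOf hnd hmc]; omega
                  have hk : uniques.idxOf ch + 1 ≤ uniques.idxOf c :=
                    (mem_drop_iff_idxOf hnd hmc _).mp hmemdrop
                  rw [hmemw (hweq ▸ hmemdrop), hweq, idxOf_drop hnd hmemdrop, hstarteq,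
                    Nat.cast_sub hk]
                  push_cast; omega
              · have hnmch : ch ∉ uniques := fun h => hlech (((hdict ch).1 jch hgch).1.mpr h)
                have hstarteq : start' = start := by rw [hstart'def]; simp [hgch, hlech]
                have hweq : w = uniques := by rw [hwdef, if_neg hnmch]
                constructor
                · rw [hstarteq, hmem_iff, hweq]; exact hold.1
                · intro hle
                  rw [hstarteq] at hle ⊢
                  rw [hmemw (hweq ▸ (hold.1.mp hle)), hweq]
                  exact hold.2 hle
          · intro hg
            rw [hgins] at hg
            have hnmc : c ∉ uniques := (hdict c).2 hg
            rw [hmem_iff, hwdef]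
            by_cases hm : ch ∈ uniques
            · rw [if_pos hm]
              exact fun h => hnmc (List.mem_of_mem_drop h)
            · rw [if_neg hm]; exact hnmc
    -- unfold one step of each loop
    show pvLoopA ucount (ch :: rest) i uniques = pvLoopB ucount n (ch :: rest) i start last
    rw [pvLoopA, pvLoopB]
    simp only [← hstart'def, hinner]
    have hcond : ((w ++ [ch]).length : Int) = ucount ↔ i - start' + 1 = ucount := by
      rw [hkey]; omega
    by_cases hb : i - start' + 1 = ucount
    · rw [if_pos (hcond.mpr hb), if_pos hb]
    · rw [if_neg (fun h => hb (hcond.mp h)), if_neg hb]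
      exact ih (i+1) start' (w ++ [ch]) (PySem.Dict.insert last ch i) n hinv'
        (by simp at hn ⊢; omega)

-- ===== VERDICT (by name: the statement is the Claim_ definition above) =====
theorem get_count_till_all_unique_spec : Claim_equal_get_count_till_all_unique := by
  intro item ucount _
  unfold Spec_get_count_till_all_unique get_count_till_all_unique get_count_till_all_unique_alt
  exact pvLoop_eq ucount item.toList 0 0 [] PySem.Dict.empty _
    ⟨by simp, List.nodup_nil, fun c => ⟨fun j hg => by simp [PySem.Dict.get?_empty] at hg,
      fun _ => List.not_mem_nil⟩⟩ (by simp)
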